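-- pv_equiv track=rewrite | github.com/wthobika/jpn_hw_tool | tool.py | clean_pages_and_dates
-- ===== SOURCE A (Python) =====
-- def clean_pages_and_dates(pages_w_dates):
--     hws = []
--     pg_range = []
--     for num in pages_w_dates:
--         if '/' in num:
--             if len(pg_range) > 1:
--                 hws.append(pg_range)
--             pg_range = []
--             pg_range.append(num)
--         else:
--             pg_range.append(num)
--
--     return hws
-- ===== SOURCE B (Python) =====
-- def clean_pages_and_dates(pages_w_dates):
--     marks = [i for i, s in enumerate(pages_w_dates) if '/' in s]
--     return [pages_w_dates[a:b] for a, b in zip([0] + marks, marks) if b - a > 1]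
-- ===== Notes on version B (the rewrite author's own statement) =====
-- stated objective: alternative
-- what changed: B is index-based: it first collects the positions of '/'-containing elements, then materializes each kept group directly as a slice between consecutive boundary indices (zip of [0]+marks with marks, kept when the span exceeds 1), instead of A's single accumulator loop that grows and conditionally flushes a running group.
import Mathlib
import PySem

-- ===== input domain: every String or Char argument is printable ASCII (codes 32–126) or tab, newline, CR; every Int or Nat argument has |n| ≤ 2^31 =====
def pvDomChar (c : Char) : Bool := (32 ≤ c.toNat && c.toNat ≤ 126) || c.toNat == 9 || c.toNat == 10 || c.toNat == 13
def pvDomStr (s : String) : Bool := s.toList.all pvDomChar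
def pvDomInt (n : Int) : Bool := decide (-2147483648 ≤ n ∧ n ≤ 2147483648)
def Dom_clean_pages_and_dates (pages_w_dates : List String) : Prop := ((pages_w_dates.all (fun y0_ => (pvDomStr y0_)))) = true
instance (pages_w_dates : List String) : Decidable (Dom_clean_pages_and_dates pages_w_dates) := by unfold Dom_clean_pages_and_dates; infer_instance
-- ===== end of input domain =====

-- B replaces A's conditionally-flushing accumulator loop by an index-based scheme: collect the
-- positions of '/'-containing elements, then emit each kept group as a slice between consecutive
-- boundary indices (objective: alternative decomposition, same cost).


-- ===== PORT A =====
def clean_pages_and_dates (pages_w_dates : List String) : List (List String) :=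
  (pages_w_dates.foldl
    (fun (st : List (List String) × List String) num =>
      if PySem.Str.isIn "/" num then
        (if st.2.length > 1 then st.1 ++ [st.2] else st.1, [num])
      else
        (st.1, st.2 ++ [num]))
    ([], [])).1

-- ===== PORT B =====
def clean_pages_and_dates_alt (pages_w_dates : List String) : List (List String) :=
  let marks : List Int :=
    ((PySem.List.enumerate pages_w_dates 0).filter (fun p => PySem.Str.isIn "/" p.2)).map (·.1)
  ((((0 : Int) :: marks).zip marks).filter (fun p => p.2 - p.1 > 1)).map
    (fun p => PySem.List.slice pages_w_dates (some p.1) (some p.2))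

-- ===== PRECONDITION & SPEC =====
def Spec_clean_pages_and_dates (pages_w_dates : List String) (out : List (List String)) : Prop := out = clean_pages_and_dates_alt pages_w_dates
instance (pages_w_dates : List String) (out : List (List String)) : Decidable (Spec_clean_pages_and_dates pages_w_dates out) := by unfold Spec_clean_pages_and_dates; infer_instance

-- ===== CLAIM (what is proved, stated in full; the proofs are below) =====
def Claim_equal_clean_pages_and_dates : Prop := ∀ (pages_w_dates : List String), Dom_clean_pages_and_dates pages_w_dates → Spec_clean_pages_and_dates pages_w_dates (clean_pages_and_dates pages_w_dates)

-- ===== LEMMAS AND PROOFS =====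

-- Closed groups (each delimited run, trailing unclosed run dropped), as a recursive spec.
def pvRuns (xs : List String) (cur : List String) : List (List String) :=
  match xs with
  | [] => []
  | x :: t => if PySem.Str.isIn "/" x then cur :: pvRuns t [x] else pvRuns t (cur ++ [x])

-- Natural-number marker positions.
def pvMarks (xs : List String) : List Nat :=
  match xs with
  | [] => []
  | x :: t => if PySem.Str.isIn "/" x then 0 :: (pvMarks t).map (· + 1) else (pvMarks t).map (· + 1)

theorem pvMarks_lt (xs : List String) (m : Nat) (h : m ∈ pvMarks xs) : m < xs.length := by
  induction xs generalizing m with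
  | nil => simp [pvMarks] at h
  | cons x t ih =>
    simp only [pvMarks] at h
    split at h
    · rcases List.mem_cons.1 h with h | h
      · simp [h]
      · obtain ⟨a, ha, rfl⟩ := List.mem_map.1 h
        have := ih a ha; simp; omega
    · obtain ⟨a, ha, rfl⟩ := List.mem_map.1 h
      have := ih a ha; simp; omega

-- A's loop is pvRuns filtered by length > 1.
theorem foldA_eq_runs (xs : List String) (hws : List (List String)) (cur : List String) :
    (xs.foldl
      (fun (st : List (List String) × List String) num =>
        if PySem.Str.isIn "/" num then
          (if st.2.length > 1 then st.1 ++ [st.2] else st.1, [num])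
        else
          (st.1, st.2 ++ [num]))
      (hws, cur)).1
    = hws ++ (pvRuns xs cur).filter (fun g => g.length > 1) := by
  induction xs generalizing hws cur with
  | nil => simp [pvRuns]
  | cons x t ih =>
    simp only [List.foldl_cons, pvRuns]
    by_cases h : PySem.Str.isIn "/" x
    · simp only [h, if_true]
      rw [ih]
      by_cases hc : cur.length > 1 <;> simp [hc]
    · simp only [h]
      exact ih hws (cur ++ [x])

-- Enumerate-based Int marks are the Nat marks shifted by the start index.
theorem marks_enum (xs : List String) (s : Int) :
    ((PySem.List.enumerate xs s).filter (fun p => PySem.Str.isIn "/" p.2)).map (·.1)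
      = (pvMarks xs).map (fun n : Nat => s + (n : Int)) := by
  induction xs generalizing s with
  | nil => simp [PySem.List.enumerate_nil, pvMarks]
  | cons x t ih =>
    rw [PySem.List.enumerate_cons]
    simp only [pvMarks, List.filter_cons]
    by_cases h : PySem.Str.isIn "/" x
    · simp only [h, if_pos, List.map_cons]
      rw [ih, List.map_map]
      refine congrArg₂ _ (by push_cast; ring) ?_
      apply List.map_congr_left; intro a _
      simp only [Function.comp_apply]; push_cast; ring
    · simp only [h, Bool.false_eq_true, if_false]
      rw [ih, List.map_map]
      apply List.map_congr_left; intro a _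
      simp only [Function.comp_apply]; push_cast; ring

-- Shifting all boundary indices by one while consing an element changes nothing in the slices.
theorem pvShiftZip (x : String) (t : List String) (l1 l2 : List Nat) :
    List.map (fun p : Nat × Nat => ((x :: t).drop p.1).take (p.2 - p.1))
      ((l1.map (· + 1)).zip (l2.map (· + 1)))
    = List.map (fun p : Nat × Nat => (t.drop p.1).take (p.2 - p.1)) (l1.zip l2) := by
  rw [List.zip_map, List.map_map]
  apply List.map_congr_left; rintro ⟨a, b⟩ _
  simp only [Function.comp_apply, Prod.map_apply, List.drop_succ_cons]
  congr 1
  omega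

-- pvRuns is the list of slices between consecutive boundaries.
theorem runs_eq_slices (xs : List String) (cur : List String) :
    pvRuns xs cur =
      match pvMarks xs with
      | [] => []
      | m :: ms =>
          (cur ++ xs.take m) ::
            ((m :: ms).zip ms).map (fun p => (xs.drop p.1).take (p.2 - p.1)) := by
  induction xs generalizing cur with
  | nil => simp [pvRuns, pvMarks]
  | cons x t ih =>
    simp only [pvRuns, pvMarks]
    by_cases h : PySem.Str.isIn "/" x
    · simp only [h, if_true]
      rw [ih [x]]
      cases hm : pvMarks t with
      | nil => simp
      | cons m ms =>
        refine Eq.trans (b := cur :: ([x] ++ List.take m t) ::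
          List.map (fun p : Nat × Nat => List.take (p.2 - p.1) (List.drop p.1 t))
            ((m :: ms).zip ms)) rfl ?_
        rw [show ((0 : Nat) :: List.map (· + 1) (m :: ms)) = 0 :: (m + 1) :: List.map (· + 1) ms from rfl,
          show (List.map (· + 1) (m :: ms)) = (m + 1) :: List.map (· + 1) ms from rfl,
          List.zip_cons_cons, List.map_cons]
        refine congrArg₂ _ (by simp) (congrArg₂ _ (by simp) ?_)
        exact (pvShiftZip x t (m :: ms) ms).symm
    · simp only [h, Bool.false_eq_true, if_false]
      rw [ih (cur ++ [x])]
      cases hm : pvMarks t with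
      | nil => simp
      | cons m ms =>
        refine Eq.trans (b := (cur ++ [x] ++ List.take m t) ::
          List.map (fun p : Nat × Nat => List.take (p.2 - p.1) (List.drop p.1 t))
            ((m :: ms).zip ms)) rfl ?_
        refine congrArg₂ _ (by simp) ?_
        exact (pvShiftZip x t (m :: ms) ms).symm

-- ===== VERDICT (by name: the statement is the Claim_ definition above) =====
theorem clean_pages_and_dates_spec : Claim_equal_clean_pages_and_dates := by
  intro xs _
  unfold Spec_clean_pages_and_dates clean_pages_and_dates clean_pages_and_dates_alt
  rw [foldA_eq_runs, runs_eq_slices, marks_enum]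
  simp only [List.nil_append, zero_add]
  cases hm : pvMarks xs with
  | nil => simp
  | cons m ms =>
    show List.filter _ ((List.take m xs) :: List.map _ ((m :: ms).zip ms))
        = List.map _ (List.filter _ ((((0 : Nat) :: m :: ms).map (fun n : Nat => (n : Int))).zip
            ((m :: ms).map (fun n : Nat => (n : Int)))))
    rw [List.zip_map, List.filter_map, List.map_map]
    have hbody :
        (((((0 : Nat) :: m :: ms).zip (m :: ms)).filter
            (((fun p : Int × Int => decide (p.2 - p.1 > 1)) ∘
              Prod.map (fun n : Nat => (n : Int)) (fun n : Nat => (n : Int))))).map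
          (((fun p : Int × Int => PySem.List.slice xs (some p.1) (some p.2)) ∘
            Prod.map (fun n : Nat => (n : Int)) (fun n : Nat => (n : Int)))))
        = ((((0 : Nat) :: m :: ms).zip (m :: ms)).filter
            (fun p : Nat × Nat => decide (((xs.drop p.1).take (p.2 - p.1)).length > 1))).map
          (fun p : Nat × Nat => (xs.drop p.1).take (p.2 - p.1)) := by
      rw [List.filter_congr]
      · apply List.map_congr_left
        intro p _
        simp only [Function.comp_apply]
        exact PySem.List.slice_natCast xs p.1 p.2
      · rintro ⟨a, b⟩ hp
        have hlt : b < xs.length := by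
          have := (List.of_mem_zip hp).2
          exact pvMarks_lt xs b (hm ▸ this)
        simp only [Function.comp_apply, Prod.map, decide_eq_decide,
          List.length_take, List.length_drop]
        omega
    rw [hbody]
    have hmap : List.take m xs ::
        List.map (fun p : Nat × Nat => (xs.drop p.1).take (p.2 - p.1)) ((m :: ms).zip ms)
        = List.map (fun p : Nat × Nat => (xs.drop p.1).take (p.2 - p.1)) ((((0 : Nat) :: m :: ms)).zip (m :: ms)) := by
      rw [List.zip_cons_cons, List.map_cons]
      simp
    rw [hmap, List.filter_map]
    rfl
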